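-- pv_equiv track=rewrite | github.com/Orso2p2n/rivals-workshop-assistant | rivals_workshop_assistant/injection/dependency_handling.py | _strip_content_in_direction
-- ===== SOURCE A (Python) =====
-- def _is_content_line(line: str, remove_comments=False) -> bool:
--     stripped = line.strip()
--     is_empty = len(stripped) == 0
--
--     if remove_comments:
--         # This assumes that lines in /* blocks also have //
--         is_comment = any(
--             stripped.startswith(comment_str) for comment_str in ("//", "/*", "*/")
--         )
--         return not (is_empty or is_comment)
--     else:
--         return not is_empty
--
-- def _strip_content_in_direction(
--     content: str, remove_comments: bool = False, reverse: bool = False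
-- ) -> str:
--     stripped_lines = []
--
--     lines = content.splitlines()
--     if reverse:
--         lines = reversed(lines)
--
--     content_found = False
--     for line in lines:
--         if content_found:
--             stripped_lines.append(line)
--         else:
--             if _is_content_line(line, remove_comments):
--                 content_found = True
--                 stripped_lines.append(line)
--
--     if reverse:
--         stripped_lines = reversed(stripped_lines)
--
--     stripped_content = "\n".join(stripped_lines)
--     return stripped_content
-- ===== SOURCE B (Python) =====
-- def _is_content_line(line: str, remove_comments=False) -> bool:
--     stripped = line.strip()
--     is_empty = len(stripped) == 0
--
--     if remove_comments:
--         is_comment = any(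
--             stripped.startswith(comment_str) for comment_str in ("//", "/*", "*/")
--         )
--         return not (is_empty or is_comment)
--     else:
--         return not is_empty
--
-- def _strip_content_in_direction(
--     content: str, remove_comments: bool = False, reverse: bool = False
-- ) -> str:
--     lines = content.splitlines()
--     if reverse:
--         while lines and not _is_content_line(lines[-1], remove_comments):
--             lines.pop()
--     else:
--         while lines and not _is_content_line(lines[0], remove_comments):
--             lines = lines[1:]
--     return "\n".join(lines)
-- ===== Notes on version B (the rewrite author's own statement) =====
-- stated objective: simpler
-- what changed: B trims non-content lines directly from the relevant end of the line list (a while loop popping/slicing at the boundary) and joins what is left, instead of A's reverse-the-list, flag-and-append accumulation pass, reverse-again scheme.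
import Mathlib
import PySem

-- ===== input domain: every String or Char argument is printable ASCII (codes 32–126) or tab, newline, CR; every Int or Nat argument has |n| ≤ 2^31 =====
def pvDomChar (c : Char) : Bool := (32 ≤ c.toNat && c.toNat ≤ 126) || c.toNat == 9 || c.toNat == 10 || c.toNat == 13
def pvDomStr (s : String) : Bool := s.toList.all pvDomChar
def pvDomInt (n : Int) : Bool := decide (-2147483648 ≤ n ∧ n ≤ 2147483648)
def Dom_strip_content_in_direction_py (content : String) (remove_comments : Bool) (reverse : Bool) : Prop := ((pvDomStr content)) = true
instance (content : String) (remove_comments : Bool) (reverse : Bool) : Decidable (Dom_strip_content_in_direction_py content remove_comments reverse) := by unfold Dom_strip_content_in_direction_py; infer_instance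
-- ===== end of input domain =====

-- B trims non-content lines directly from the relevant end of the line list and joins
-- what is left, instead of A's reverse, flag-and-append accumulation, reverse-again scheme (objective: simpler).

-- ===== PORT A =====
def is_content_line_py (line : String) (remove_comments : Bool) : Bool :=
  let stripped := PySem.Str.strip line
  let is_empty := PySem.Str.len stripped == 0
  if remove_comments then
    let is_comment :=
      PySem.Str.startswith stripped "//" || PySem.Str.startswith stripped "/*" ||
        PySem.Str.startswith stripped "*/"
    !(is_empty || is_comment)
  else
    !is_empty

def strip_content_in_direction_py (content : String) (remove_comments : Bool) (reverse : Bool) : String :=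
  let lines := PySem.Str.splitlines content
  let lines := if reverse then lines.reverse else lines
  let st :=
    lines.foldl
      (fun (st : List String × Bool) line =>
        if st.2 then (st.1 ++ [line], st.2)
        else if is_content_line_py line remove_comments then (st.1 ++ [line], true)
        else st)
      ([], false)
  let stripped_lines := if reverse then st.1.reverse else st.1
  PySem.Str.join "\n" stripped_lines

-- ===== PORT B =====
def is_content_line_py_alt (line : String) (remove_comments : Bool) : Bool :=
  let stripped := PySem.Str.strip line
  let is_empty := PySem.Str.len stripped == 0
  if remove_comments then
    let is_comment :=
      PySem.Str.startswith stripped "//" || PySem.Str.startswith stripped "/*" ||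
        PySem.Str.startswith stripped "*/"
    !(is_empty || is_comment)
  else
    !is_empty

-- while lines and not content(lines[0]): lines = lines[1:]
def pvTrimFront (remove_comments : Bool) : List String → List String
  | [] => []
  | l :: ls =>
    if is_content_line_py_alt l remove_comments then l :: ls
    else pvTrimFront remove_comments ls

-- while lines and not content(lines[-1]): lines.pop()
def pvTrimBack (remove_comments : Bool) : List String → List String
  | [] => []
  | l :: ls =>
    match pvTrimBack remove_comments ls with
    | [] => if is_content_line_py_alt l remove_comments then [l] else []
    | r => l :: r

def strip_content_in_direction_py_alt (content : String) (remove_comments : Bool) (reverse : Bool) : String :=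
  let lines := PySem.Str.splitlines content
  let lines :=
    if reverse then pvTrimBack remove_comments lines
    else pvTrimFront remove_comments lines
  PySem.Str.join "\n" lines

-- ===== PRECONDITION & SPEC =====
def Spec_strip_content_in_direction_py (content : String) (remove_comments : Bool) (reverse : Bool) (out : String) : Prop := out = strip_content_in_direction_py_alt content remove_comments reverse
instance (content : String) (remove_comments : Bool) (reverse : Bool) (out : String) : Decidable (Spec_strip_content_in_direction_py content remove_comments reverse out) := by unfold Spec_strip_content_in_direction_py; infer_instance

-- ===== CLAIM (what is proved, stated in full; the proofs are below) =====
def Claim_equal_strip_content_in_direction_py : Prop := ∀ (content : String) (remove_comments : Bool) (reverse : Bool), Dom_strip_content_in_direction_py content remove_comments reverse → Spec_strip_content_in_direction_py content remove_comments reverse (strip_content_in_direction_py content remove_comments reverse)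

-- ===== LEMMAS AND PROOFS =====

theorem is_content_eq (l : String) (rc : Bool) :
    is_content_line_py l rc = is_content_line_py_alt l rc := rfl

-- once the flag is true, A's loop appends everything
theorem foldA_true (rc : Bool) (ls : List String) (acc : List String) :
    ls.foldl
      (fun (st : List String × Bool) line =>
        if st.2 then (st.1 ++ [line], st.2)
        else if is_content_line_py line rc then (st.1 ++ [line], true)
        else st)
      (acc, true) = (acc ++ ls, true) := by
  induction ls generalizing acc with
  | nil => simp
  | cons l ls ih => simp [List.foldl, ih]

-- with the flag false, A's loop computes acc ++ dropWhile (¬ content)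
theorem foldA_false (rc : Bool) (ls : List String) (acc : List String) :
    (ls.foldl
      (fun (st : List String × Bool) line =>
        if st.2 then (st.1 ++ [line], st.2)
        else if is_content_line_py line rc then (st.1 ++ [line], true)
        else st)
      (acc, false)).1
      = acc ++ ls.dropWhile (fun l => !is_content_line_py l rc) := by
  induction ls generalizing acc with
  | nil => simp
  | cons l ls ih =>
    by_cases h : is_content_line_py l rc
    · simp [List.foldl, h, List.dropWhile, foldA_true]
    · simp [List.foldl, h, List.dropWhile, ih]

theorem trimFront_eq (rc : Bool) (ls : List String) :
    pvTrimFront rc ls = ls.dropWhile (fun l => !is_content_line_py_alt l rc) := by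
  induction ls with
  | nil => rfl
  | cons l ls ih =>
    by_cases h : is_content_line_py_alt l rc
    · simp [pvTrimFront, h, List.dropWhile]
    · simp [pvTrimFront, h, List.dropWhile, ih]

theorem trimBack_eq (rc : Bool) (ls : List String) :
    pvTrimBack rc ls
      = ((ls.reverse).dropWhile (fun l => !is_content_line_py_alt l rc)).reverse := by
  induction ls with
  | nil => rfl
  | cons l ls ih =>
    simp only [pvTrimBack, List.reverse_cons, List.dropWhile_append]
    cases hr : (ls.reverse).dropWhile (fun l => !is_content_line_py_alt l rc) with
    | nil =>
      rw [hr] at ih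
      by_cases h : is_content_line_py_alt l rc <;>
        simp [ih, List.dropWhile, h]
    | cons r rs =>
      rw [hr] at ih
      simp [ih]

theorem strip_eq (content : String) (rc rev : Bool) :
    strip_content_in_direction_py content rc rev
      = strip_content_in_direction_py_alt content rc rev := by
  unfold strip_content_in_direction_py strip_content_in_direction_py_alt
  cases rev with
  | false =>
    dsimp only
    rw [foldA_false, trimFront_eq]
    simp [is_content_eq]
  | true =>
    dsimp only
    rw [foldA_false, trimBack_eq]
    simp [is_content_eq]

-- ===== VERDICT (by name: the statement is the Claim_ definition above) =====
theorem strip_content_in_direction_py_spec : Claim_equal_strip_content_in_direction_py := by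
  intro content rc rev _
  exact strip_eq content rc rev
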